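-- pv_equiv track=rewrite | github.com/aliciasagdullaeva/DiscreteCalc | algorithms/TDNF_coder.py | has_more_minimal
-- ===== SOURCE A (Python) =====
-- def has_more_minimal(dnf: list, tupik_dnfs: list):
--     is_included = True
--     for tupik in tupik_dnfs:
--         for part in tupik:
--             if part not in dnf:
--                 is_included = False
--                 break
--         if is_included:
--             return True
--     return False
-- ===== SOURCE B (Python) =====
-- def has_more_minimal(dnf: list, tupik_dnfs: list):
--     have = set(dnf)
--     return any(all(part in have for part in tupik) for tupik in tupik_dnfs)
-- ===== Notes on version B (the rewrite author's own statement) =====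
-- stated objective: simpler
-- what changed: Replaces the flag-and-break nested loops (whose is_included flag is never reset, so only the first clause is ever effectively tested) by a set of dnf parts and a direct any/all over all clauses.
-- intended difference: On inputs whose first clause has a part missing from dnf but some later clause has all its parts in dnf, A returns False (its is_included flag is never reset, a bug), while B returns True, which is the intended 'any clause fully included' check. — e.g. on has_more_minimal(["a"], [["b"], ["a"]]): A returns false, B returns true
import Mathlib
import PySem

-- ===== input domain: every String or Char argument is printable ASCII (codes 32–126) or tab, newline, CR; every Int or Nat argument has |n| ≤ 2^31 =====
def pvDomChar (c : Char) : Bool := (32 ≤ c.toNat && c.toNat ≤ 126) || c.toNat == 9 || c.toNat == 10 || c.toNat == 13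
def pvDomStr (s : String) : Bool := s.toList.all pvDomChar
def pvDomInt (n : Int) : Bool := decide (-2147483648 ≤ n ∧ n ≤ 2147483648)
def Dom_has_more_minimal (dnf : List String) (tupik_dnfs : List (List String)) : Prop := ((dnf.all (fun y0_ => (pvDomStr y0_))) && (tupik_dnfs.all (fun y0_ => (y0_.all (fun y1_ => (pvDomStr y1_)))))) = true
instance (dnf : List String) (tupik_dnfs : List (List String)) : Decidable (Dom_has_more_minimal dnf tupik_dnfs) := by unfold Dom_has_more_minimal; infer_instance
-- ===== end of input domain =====

-- B replaces A's flag-and-break nested loops (whose never-reset flag makes only the first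
-- clause effective — a bug) by the intended any/all membership check over a set of dnf parts.


-- ===== PORT A =====
-- inner 'for part in tupik: if part not in dnf: is_included = False; break'
def hmmInner (dnf : List String) (tupik : List String) (is_included : Bool) : Bool :=
  match tupik with
  | [] => is_included
  | part :: rest =>
    if !(dnf.contains part) then false
    else hmmInner dnf rest is_included

-- outer 'for tupik in tupik_dnfs: … ; if is_included: return True' with the flag threaded
def hmmOuter (dnf : List String) (ts : List (List String)) (is_included : Bool) : Bool :=
  match ts with
  | [] => false
  | tupik :: rest =>
    let is_included := hmmInner dnf tupik is_included
    if is_included then true else hmmOuter dnf rest is_included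

def has_more_minimal (dnf : List String) (tupik_dnfs : List (List String)) : Bool :=
  hmmOuter dnf tupik_dnfs true

-- ===== PORT B =====
def has_more_minimal_alt (dnf : List String) (tupik_dnfs : List (List String)) : Bool :=
  let have_ := PySem.Set.ofList dnf
  tupik_dnfs.any (fun tupik => tupik.all (fun part => PySem.Set.contains have_ part))

-- ===== PRECONDITION & SPEC =====
-- On inputs whose first clause has a part missing from dnf but some later clause has all its
-- parts in dnf, A returns False (its is_included flag is never reset, a bug) while B returns
-- True, the intended 'some clause fully included' answer.
def D_has_more_minimal (dnf : List String) (tupik_dnfs : List (List String)) : Prop :=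
  (tupik_dnfs.headD []).any (fun part => !(dnf.contains part)) = true ∧
  tupik_dnfs.tail.any (fun tupik => tupik.all (fun part => dnf.contains part)) = true
instance (dnf : List String) (tupik_dnfs : List (List String)) : Decidable (D_has_more_minimal dnf tupik_dnfs) := by unfold D_has_more_minimal; infer_instance

def Spec_has_more_minimal (dnf : List String) (tupik_dnfs : List (List String)) (out : Bool) : Prop := ¬ D_has_more_minimal dnf tupik_dnfs → out = has_more_minimal_alt dnf tupik_dnfs
instance (dnf : List String) (tupik_dnfs : List (List String)) (out : Bool) : Decidable (Spec_has_more_minimal dnf tupik_dnfs out) := by unfold Spec_has_more_minimal; infer_instance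

def pvDiffWitness_has_more_minimal : List String × List (List String) := (["a"], [["b"], ["a"]])
def pvDiffWitnessOut_has_more_minimal : Bool × Bool := (false, true)

-- ===== CLAIM =====
def Claim_unchanged_has_more_minimal : Prop := ∀ (dnf : List String) (tupik_dnfs : List (List String)), Dom_has_more_minimal dnf tupik_dnfs → Spec_has_more_minimal dnf tupik_dnfs (has_more_minimal dnf tupik_dnfs)
def Claim_changed_has_more_minimal : Prop := Dom_has_more_minimal (pvDiffWitness_has_more_minimal.1) (pvDiffWitness_has_more_minimal.2) ∧ D_has_more_minimal (pvDiffWitness_has_more_minimal.1) (pvDiffWitness_has_more_minimal.2) ∧ has_more_minimal (pvDiffWitness_has_more_minimal.1) (pvDiffWitness_has_more_minimal.2) = pvDiffWitnessOut_has_more_minimal.1 ∧ has_more_minimal_alt (pvDiffWitness_has_more_minimal.1) (pvDiffWitness_has_more_minimal.2) = pvDiffWitnessOut_has_more_minimal.2 ∧ pvDiffWitnessOut_has_more_minimal.1 ≠ pvDiffWitnessOut_has_more_minimal.2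
def Claim_exact_has_more_minimal : Prop := ∀ (dnf : List String) (tupik_dnfs : List (List String)), Dom_has_more_minimal dnf tupik_dnfs → D_has_more_minimal dnf tupik_dnfs → has_more_minimal dnf tupik_dnfs ≠ has_more_minimal_alt dnf tupik_dnfs

-- ===== LEMMAS AND PROOFS =====

-- once the flag is False, the inner loop keeps it False
theorem hmmInner_false (dnf : List String) (t : List String) :
    hmmInner dnf t false = false := by
  induction t with
  | nil => rfl
  | cons p rest ih => simp only [hmmInner]; split <;> simp [ih]

-- with the flag True, the inner loop computes 'all parts in dnf'
theorem hmmInner_true (dnf : List String) (t : List String) :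
    hmmInner dnf t true = t.all (fun p => dnf.contains p) := by
  induction t with
  | nil => rfl
  | cons p rest ih =>
    simp only [hmmInner, List.all_cons]
    cases h : dnf.contains p <;> simp [ih]

-- with the flag False, the whole outer loop returns False
theorem hmmOuter_false (dnf : List String) (ts : List (List String)) :
    hmmOuter dnf ts false = false := by
  induction ts with
  | nil => rfl
  | cons t rest ih => simp [hmmOuter, hmmInner_false, ih]

-- characterisation of A: the first clause alone decides the answer
theorem hmmA_char (dnf : List String) (t : List String) (rest : List (List String)) :
    has_more_minimal dnf (t :: rest) = t.all (fun p => dnf.contains p) := by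
  simp only [has_more_minimal, hmmOuter, hmmInner_true]
  cases h : t.all (fun p => dnf.contains p)
  · simp [hmmOuter_false]
  · rfl

-- B's set membership agrees with list membership
theorem hmmB_char (dnf : List String) (ts : List (List String)) :
    has_more_minimal_alt dnf ts = ts.any (fun t => t.all (fun p => dnf.contains p)) := by
  simp only [has_more_minimal_alt]
  congr 1
  funext t
  congr 1
  funext p
  simp [PySem.Set.mem_ofList]

-- ===== VERDICT =====
theorem has_more_minimal_spec : Claim_unchanged_has_more_minimal := by
  intro dnf ts _ hD
  unfold D_has_more_minimal at hD
  rw [hmmB_char]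
  cases ts with
  | nil => rfl
  | cons t rest =>
    rw [hmmA_char, List.any_cons]
    simp only [List.headD_cons, List.tail_cons] at hD
    cases h : t.all (fun p => dnf.contains p) with
    | true => rw [Bool.true_or]
    | false =>
      have h1 : (t.any fun part => !dnf.contains part) = true := by
        rw [List.all_eq_not_any_not] at h
        rwa [Bool.not_eq_false'] at h
      cases hb : (rest.any fun tupik => tupik.all fun part => dnf.contains part) with
      | false => rfl
      | true => exact absurd (And.intro h1 hb) hD

theorem has_more_minimal_changed : Claim_changed_has_more_minimal := by
  unfold Claim_changed_has_more_minimal; decide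

theorem has_more_minimal_tight : Claim_exact_has_more_minimal := by
  intro dnf ts _ hD
  unfold D_has_more_minimal at hD
  cases ts with
  | nil => exact absurd hD.1 (by simp)
  | cons t rest =>
    simp only [List.headD_cons, List.tail_cons] at hD
    rw [hmmA_char, hmmB_char, List.any_cons]
    have hf : (t.all fun p => dnf.contains p) = false := by
      rw [List.all_eq_not_any_not, hD.1]; rfl
    rw [hf, hD.2]
    simp
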